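-- pv_equiv track=rewrite | github.com/YesselmanLabPublications/2025_char_3d_struct_features | dms_3d_features/pdb_features.py | __find_positions_of_a_and_cs
-- ===== SOURCE A (Python) =====
-- def __find_positions_of_a_and_cs(motif: str) -> tuple:
--     motif1, motif2 = motif.split("_")
--     a_pos1 = [pos + 3 for pos, char in enumerate(motif1) if char == "A"]
--     a_pos2 = [
--         pos + 7 + len(motif1) for pos, char in enumerate(motif2) if char == "A"
--     ]
--     c_pos1 = [pos + 3 for pos, char in enumerate(motif1) if char == "C"]
--     c_pos2 = [
--         pos + 7 + len(motif1) for pos, char in enumerate(motif2) if char == "C"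
--     ]
--     return a_pos1, a_pos2, c_pos1, c_pos2
-- ===== SOURCE B (Python) =====
-- def __find_positions_of_a_and_cs(motif: str) -> tuple:
--     # No splitting: with exactly one '_', a char after it at global index i has
--     # second-half position (i - u - 1) + 7 + u = i + 6, independent of the
--     # underscore's index u; before it the position is i + 3.  So one pass over
--     # the whole string with the global index suffices.
--     if motif.count("_") != 1:
--         raise ValueError("motif must contain exactly one '_'")
--     a_pos1, a_pos2, c_pos1, c_pos2 = [], [], [], []
--     seen_us = False
--     for i, ch in enumerate(motif):
--         if ch == "_":
--             seen_us = True
--         elif ch == "A":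
--             (a_pos2 if seen_us else a_pos1).append(i + (6 if seen_us else 3))
--         elif ch == "C":
--             (c_pos2 if seen_us else c_pos1).append(i + (6 if seen_us else 3))
--     return a_pos1, a_pos2, c_pos1, c_pos2
-- ===== Notes on version B (the rewrite author's own statement) =====
-- stated objective: alternative
-- what changed: B never splits the string: it validates with motif.count('_') == 1 and makes one fused pass over the whole motif using the global index, exploiting that the second-half position collapses to i + 6 regardless of where the underscore sits (vs A's split plus four comprehension scans).
import Mathlib
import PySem

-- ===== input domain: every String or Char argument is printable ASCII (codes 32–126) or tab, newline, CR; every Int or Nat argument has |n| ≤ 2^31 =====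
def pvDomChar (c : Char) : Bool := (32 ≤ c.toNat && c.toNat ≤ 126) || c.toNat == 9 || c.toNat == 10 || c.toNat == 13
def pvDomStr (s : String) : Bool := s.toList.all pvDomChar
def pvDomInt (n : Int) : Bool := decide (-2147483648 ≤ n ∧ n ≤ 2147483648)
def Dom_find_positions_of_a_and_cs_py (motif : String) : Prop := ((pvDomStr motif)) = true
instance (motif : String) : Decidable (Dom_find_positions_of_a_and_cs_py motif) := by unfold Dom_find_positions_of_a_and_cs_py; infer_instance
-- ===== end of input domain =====

-- B removes the split entirely: one fused pass over the whole motif with the global index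
-- (positions i+3 before the unique '_' and i+6 after it), instead of A's split + four scans.

-- ===== PORT A =====
-- 'motif1, motif2 = motif.split("_")' raises ValueError unless the split has exactly 2 parts;
-- those inputs are excluded by Pre_ below and the port returns ([],[],[],[]) there (unreachable under Pre_).
def find_positions_of_a_and_cs_py (motif : String) : List Int × List Int × List Int × List Int :=
  match PySem.Str.split? motif "_" with
  | some [motif1, motif2] =>
    let a_pos1 := ((PySem.List.enumerate motif1.toList).filter (fun p => p.2 == 'A')).map (fun p => p.1 + 3)
    let a_pos2 := ((PySem.List.enumerate motif2.toList).filter (fun p => p.2 == 'A')).map (fun p => p.1 + 7 + PySem.Str.len motif1)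
    let c_pos1 := ((PySem.List.enumerate motif1.toList).filter (fun p => p.2 == 'C')).map (fun p => p.1 + 3)
    let c_pos2 := ((PySem.List.enumerate motif2.toList).filter (fun p => p.2 == 'C')).map (fun p => p.1 + 7 + PySem.Str.len motif1)
    (a_pos1, a_pos2, c_pos1, c_pos2)
  | _ => ([], [], [], [])

-- ===== PORT B =====
-- loop body of Source B: state = ((a_pos1, a_pos2, c_pos1, c_pos2), seen_us)
def pvStepAC (st : (List Int × List Int × List Int × List Int) × Bool) (p : Int × Char) :
    (List Int × List Int × List Int × List Int) × Bool :=
  let a1 := st.1.1; let a2 := st.1.2.1; let c1 := st.1.2.2.1; let c2 := st.1.2.2.2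
  if p.2 == '_' then ((a1, a2, c1, c2), true)
  else if p.2 == 'A' then
    (if st.2 then ((a1, a2 ++ [p.1 + 6], c1, c2), st.2) else ((a1 ++ [p.1 + 3], a2, c1, c2), st.2))
  else if p.2 == 'C' then
    (if st.2 then ((a1, a2, c1, c2 ++ [p.1 + 6]), st.2) else ((a1, a2, c1 ++ [p.1 + 3], c2), st.2))
  else st

-- Source B raises ValueError when motif.count('_') ≠ 1; the port returns ([],[],[],[]) there (outside Pre_).
def find_positions_of_a_and_cs_py_alt (motif : String) : List Int × List Int × List Int × List Int :=
  if PySem.Str.count motif "_" ≠ 1 then ([], [], [], [])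
  else ((PySem.List.enumerate motif.toList).foldl pvStepAC (([], [], [], []), false)).1

-- ===== PRECONDITION & SPEC =====
-- Pre_ excludes exactly the inputs (no '_' or several) where A's 2-variable unpacking of
-- motif.split('_') raises ValueError (Source B raises ValueError there too).
def Pre_find_positions_of_a_and_cs_py (motif : String) : Prop :=
  motif.toList.count '_' = 1
instance (motif : String) : Decidable (Pre_find_positions_of_a_and_cs_py motif) := by unfold Pre_find_positions_of_a_and_cs_py; infer_instance
def pvWitness_find_positions_of_a_and_cs_py : String := "AC_C"

def Spec_find_positions_of_a_and_cs_py (motif : String) (out : List Int × List Int × List Int × List Int) : Prop := out = find_positions_of_a_and_cs_py_alt motif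
instance (motif : String) (out : List Int × List Int × List Int × List Int) : Decidable (Spec_find_positions_of_a_and_cs_py motif out) := by unfold Spec_find_positions_of_a_and_cs_py; infer_instance

-- ===== CLAIM (what is proved, stated in full; the proofs are below) =====
def Claim_equal_find_positions_of_a_and_cs_py : Prop := ∀ (motif : String), Dom_find_positions_of_a_and_cs_py motif → Pre_find_positions_of_a_and_cs_py motif → Spec_find_positions_of_a_and_cs_py motif (find_positions_of_a_and_cs_py motif)

-- ===== LEMMAS AND PROOFS =====

-- count '_' = 1 gives the decomposition l1 ++ '_' :: l2 with '_' in neither part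
theorem pv_decomp (l : List Char) (h : l.count '_' = 1) :
    ∃ l1 l2, l = l1 ++ '_' :: l2 ∧ '_' ∉ l1 ∧ '_' ∉ l2 := by
  induction l with
  | nil => simp at h
  | cons x xs ih =>
    by_cases hx : x = '_'
    · subst hx
      have h0 : xs.count '_' = 0 := by simpa [List.count_cons] using h
      exact ⟨[], xs, by simp, by simp, by simpa using (List.count_eq_zero.mp h0)⟩
    · have h1 : xs.count '_' = 1 := by simpa [List.count_cons, hx] using h
      obtain ⟨l1, l2, hl, h1', h2'⟩ := ih h1
      refine ⟨x :: l1, l2, by simp [hl], ?_, h2'⟩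
      intro hm
      rcases List.mem_cons.mp hm with hm | hm
      · exact hx hm.symm
      · exact h1' hm

-- splitOn.go never finds a separator in a '_'-free tail (any fuel)
theorem pv_go_no_sep (fuel : Nat) (l cur : List Char) (acc : List (List Char))
    (h : '_' ∉ l) :
    PySem.Chars.splitOn.go ['_'] fuel l cur acc = ((cur.reverse ++ l) :: acc).reverse := by
  induction fuel generalizing l cur with
  | zero => simp [PySem.Chars.splitOn.go]
  | succ f ih =>
    cases l with
    | nil => simp [PySem.Chars.splitOn.go]
    | cons c rest =>
      have hc : ¬ (c = '_') := fun hc => h (by simp [hc])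
      have hp : List.isPrefixOf ['_'] (c :: rest) = false := by
        simp [List.isPrefixOf]; exact fun h' => absurd h'.symm hc
      rw [PySem.Chars.splitOn.go.eq_def]
      simp only [hp, Bool.false_eq_true, if_false]
      rw [ih rest (c :: cur) (fun hm => h (by simp [hm]))]
      simp

theorem pv_go_one_sep (l1 : List Char) : ∀ (fuel : Nat) (l2 cur : List Char)
    (acc : List (List Char)), '_' ∉ l1 → '_' ∉ l2 → l1.length + 1 ≤ fuel →
    PySem.Chars.splitOn.go ['_'] fuel (l1 ++ '_' :: l2) cur acc
      = acc.reverse ++ [cur.reverse ++ l1, l2] := by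
  induction l1 with
  | nil =>
    intro fuel l2 cur acc _ h2 hf
    cases fuel with
    | zero => omega
    | succ f =>
      rw [PySem.Chars.splitOn.go.eq_def]
      have hp : List.isPrefixOf ['_'] ('_' :: l2) = true := by simp [List.isPrefixOf]
      simp only [List.nil_append, hp, if_true]
      rw [show List.drop (List.length ['_']) ('_' :: l2) = l2 by simp]
      rw [pv_go_no_sep f l2 [] (cur.reverse :: acc) h2]
      simp
  | cons a rest ih =>
    intro fuel l2 cur acc h1 h2 hf
    have ha : ¬ (a = '_') := fun hc => h1 (by simp [hc])
    cases fuel with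
    | zero => simp at hf
    | succ f =>
      rw [PySem.Chars.splitOn.go.eq_def]
      have hp : List.isPrefixOf ['_'] (a :: (rest ++ '_' :: l2)) = false := by
        simp [List.isPrefixOf]; exact fun h' => absurd h'.symm ha
      simp only [List.cons_append, hp, Bool.false_eq_true, if_false]
      rw [ih f l2 (a :: cur) acc (fun hm => h1 (by simp [hm])) h2 (by simp only [List.length_cons] at hf; omega)]
      simp

theorem pv_splitOn_eq (l1 l2 : List Char) (h1 : '_' ∉ l1) (h2 : '_' ∉ l2) :
    PySem.Chars.splitOn (l1 ++ '_' :: l2) ['_'] = [l1, l2] := by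
  unfold PySem.Chars.splitOn
  rw [pv_go_one_sep l1 ((l1 ++ '_' :: l2).length + 1) l2 [] [] h1 h2 (by simp)]
  simp

-- count.go analogues
theorem pv_cgo_no_sep (fuel : Nat) (l : List Char) (acc : Nat) (h : '_' ∉ l) :
    PySem.Chars.count.go ['_'] fuel l acc = acc := by
  induction fuel generalizing l with
  | zero => simp [PySem.Chars.count.go]
  | succ f ih =>
    cases l with
    | nil => simp [PySem.Chars.count.go]
    | cons c rest =>
      have hc : ¬ (c = '_') := fun hc => h (by simp [hc])
      have hp : List.isPrefixOf ['_'] (c :: rest) = false := by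
        simp [List.isPrefixOf]; exact fun h' => absurd h'.symm hc
      rw [PySem.Chars.count.go.eq_def]
      simp only [hp, Bool.false_eq_true, if_false]
      exact ih rest (fun hm => h (by simp [hm]))

theorem pv_cgo_one_sep (l1 : List Char) : ∀ (fuel : Nat) (l2 : List Char) (acc : Nat),
    '_' ∉ l1 → '_' ∉ l2 → l1.length + 1 ≤ fuel →
    PySem.Chars.count.go ['_'] fuel (l1 ++ '_' :: l2) acc = acc + 1 := by
  induction l1 with
  | nil =>
    intro fuel l2 acc _ h2 hf
    cases fuel with
    | zero => omega
    | succ f =>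
      rw [PySem.Chars.count.go.eq_def]
      have hp : List.isPrefixOf ['_'] ('_' :: l2) = true := by simp [List.isPrefixOf]
      simp only [List.nil_append, hp, if_true]
      rw [show List.drop (List.length ['_']) ('_' :: l2) = l2 by simp]
      exact pv_cgo_no_sep f l2 (acc + 1) h2
  | cons a rest ih =>
    intro fuel l2 acc h1 h2 hf
    have ha : ¬ (a = '_') := fun hc => h1 (by simp [hc])
    cases fuel with
    | zero => simp at hf
    | succ f =>
      rw [PySem.Chars.count.go.eq_def]
      have hp : List.isPrefixOf ['_'] (a :: (rest ++ '_' :: l2)) = false := by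
        simp [List.isPrefixOf]; exact fun h' => absurd h'.symm ha
      simp only [List.cons_append, hp, Bool.false_eq_true, if_false]
      exact ih f l2 acc (fun hm => h1 (by simp [hm])) h2 (by simp only [List.length_cons] at hf; omega)

theorem pv_count_eq (l1 l2 : List Char) (h1 : '_' ∉ l1) (h2 : '_' ∉ l2) :
    PySem.Chars.count (l1 ++ '_' :: l2) ['_'] = 1 := by
  unfold PySem.Chars.count
  rw [if_neg (by simp)]
  rw [pv_cgo_one_sep l1 ((l1 ++ '_' :: l2).length) l2 0 h1 h2 (by simp)]

-- enumerate index shift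
theorem pv_enumerate_shift (l : List Char) (s : Int) :
    PySem.List.enumerate l s = (PySem.List.enumerate l 0).map (fun p => (p.1 + s, p.2)) := by
  apply List.ext_getElem?
  intro k
  simp only [PySem.List.getElem?_enumerate, List.getElem?_map, Option.map_map]
  cases l[k]? <;> simp [Prod.ext_iff]; omega

-- B's fold before the underscore (seen_us = false, no '_' in the chunk)
theorem pv_fold_before (L : List (Int × Char)) :
    ∀ (a1 a2 c1 c2 : List Int), (∀ p ∈ L, p.2 ≠ '_') →
    L.foldl pvStepAC ((a1, a2, c1, c2), false)
      = ((a1 ++ (L.filter (fun p => p.2 == 'A')).map (fun p => p.1 + 3), a2,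
          c1 ++ (L.filter (fun p => p.2 == 'C')).map (fun p => p.1 + 3), c2), false) := by
  induction L with
  | nil => intro a1 a2 c1 c2 _; simp
  | cons x xs ih =>
    intro a1 a2 c1 c2 h
    have hx : ¬ (x.2 = '_') := h x (by simp)
    have hxs : ∀ p ∈ xs, p.2 ≠ '_' := fun p hp => h p (by simp [hp])
    by_cases hA : x.2 = 'A'
    · simp only [List.foldl_cons, pvStepAC, hA]
      rw [show (('A' : Char) == '_') = false by decide]
      simp only [Bool.false_eq_true, if_false, beq_self_eq_true, if_true, if_false]
      rw [ih (a1 ++ [x.1 + 3]) a2 c1 c2 hxs]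
      simp [hA]
    · by_cases hC : x.2 = 'C'
      · simp only [List.foldl_cons, pvStepAC, hC]
        rw [show (('C' : Char) == '_') = false by decide,
            show (('C' : Char) == 'A') = false by decide]
        simp only [Bool.false_eq_true, if_false, beq_self_eq_true, if_true]
        rw [ih a1 a2 (c1 ++ [x.1 + 3]) c2 hxs]
        simp [hC]
      · simp only [List.foldl_cons, pvStepAC]
        rw [if_neg (by simpa using hx), if_neg (by simpa using hA), if_neg (by simpa using hC)]
        rw [ih a1 a2 c1 c2 hxs]
        simp [show (x.2 == 'A') = false by simpa using hA,
          show (x.2 == 'C') = false by simpa using hC]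

-- B's fold after the underscore (seen_us = true)
theorem pv_fold_after (L : List (Int × Char)) :
    ∀ (a1 a2 c1 c2 : List Int),
    L.foldl pvStepAC ((a1, a2, c1, c2), true)
      = ((a1, a2 ++ (L.filter (fun p => p.2 == 'A')).map (fun p => p.1 + 6),
          c1, c2 ++ (L.filter (fun p => p.2 == 'C')).map (fun p => p.1 + 6)), true) := by
  induction L with
  | nil => intro a1 a2 c1 c2; simp
  | cons x xs ih =>
    intro a1 a2 c1 c2
    by_cases hU : x.2 = '_'
    · simp only [List.foldl_cons, pvStepAC, hU]
      simp only [beq_self_eq_true, if_true]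
      rw [ih a1 a2 c1 c2]
      simp [hU]
    · by_cases hA : x.2 = 'A'
      · simp only [List.foldl_cons, pvStepAC, hA]
        rw [show (('A' : Char) == '_') = false by decide]
        simp only [Bool.false_eq_true, if_false, beq_self_eq_true, if_true]
        rw [ih a1 (a2 ++ [x.1 + 6]) c1 c2]
        simp [hA]
      · by_cases hC : x.2 = 'C'
        · simp only [List.foldl_cons, pvStepAC, hC]
          rw [show (('C' : Char) == '_') = false by decide,
              show (('C' : Char) == 'A') = false by decide]
          simp only [Bool.false_eq_true, if_false, beq_self_eq_true, if_true]
          rw [ih a1 a2 c1 (c2 ++ [x.1 + 6])]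
          simp [hC]
        · simp only [List.foldl_cons, pvStepAC]
          rw [if_neg (by simpa using hU), if_neg (by simpa using hA), if_neg (by simpa using hC)]
          rw [ih a1 a2 c1 c2]
          simp [show (x.2 == 'A') = false by simpa using hA,
            show (x.2 == 'C') = false by simpa using hC]

-- shifting the enumeration start is the same as shifting the mapped offset
theorem pv_shifted_chunk (l : List Char) (u : Nat) (ch : Char) :
    ((PySem.List.enumerate l ((u : Int) + 1)).filter (fun p => p.2 == ch)).map (fun p => p.1 + 6)
      = ((PySem.List.enumerate l 0).filter (fun p => p.2 == ch)).map (fun p => p.1 + 7 + (u : Int)) := by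
  rw [pv_enumerate_shift l ((u : Int) + 1)]
  rw [List.filter_map, List.map_map]
  simp only [Function.comp_def]
  apply List.map_congr_left
  intro p _
  ring

-- ===== VERDICT (by name: the statement is the Claim_ definition above) =====
theorem find_positions_of_a_and_cs_py_spec : Claim_equal_find_positions_of_a_and_cs_py := by
  intro motif _ hpre
  unfold Spec_find_positions_of_a_and_cs_py
  unfold Pre_find_positions_of_a_and_cs_py at hpre
  obtain ⟨l1, l2, hl, h1, h2⟩ := pv_decomp motif.toList hpre
  have hsplit : PySem.Str.split? motif "_" = some [String.ofList l1, String.ofList l2] := by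
    unfold PySem.Str.split? PySem.Chars.split?
    rw [hl]
    simp [pv_splitOn_eq l1 l2 h1 h2]
  have hcount : PySem.Str.count motif "_" = 1 := by
    unfold PySem.Str.count
    rw [hl]
    simpa using pv_count_eq l1 l2 h1 h2
  unfold find_positions_of_a_and_cs_py find_positions_of_a_and_cs_py_alt
  rw [hsplit, hcount]
  simp only [ne_eq, not_true_eq_false, if_false]
  rw [hl, PySem.List.enumerate_append, PySem.List.enumerate_cons]
  rw [List.foldl_append, List.foldl_cons]
  rw [pv_fold_before (PySem.List.enumerate l1 0) [] [] [] []
        (by intro p hp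
            rw [PySem.List.mem_enumerate_iff] at hp
            obtain ⟨k, hk, rfl⟩ := hp
            exact fun hc => h1 (hc ▸ List.getElem_mem hk))]
  have hstep : pvStepAC
      (([] ++ ((PySem.List.enumerate l1 0).filter (fun p => p.2 == 'A')).map (fun p => p.1 + 3), [],
        [] ++ ((PySem.List.enumerate l1 0).filter (fun p => p.2 == 'C')).map (fun p => p.1 + 3), []), false)
      ((0 : Int) + l1.length, '_')
      = ((((PySem.List.enumerate l1 0).filter (fun p => p.2 == 'A')).map (fun p => p.1 + 3), [],
          ((PySem.List.enumerate l1 0).filter (fun p => p.2 == 'C')).map (fun p => p.1 + 3), []), true) := by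
    simp [pvStepAC]
  rw [hstep]
  rw [pv_fold_after]
  have henum2 : ((0 : Int) + (l1.length : Int) + 1) = ((l1.length : Nat) : Int) + 1 := by ring
  rw [henum2]
  rw [pv_shifted_chunk l2 l1.length 'A', pv_shifted_chunk l2 l1.length 'C']
  simp [PySem.Str.len]
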